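-- pv_equiv track=rewrite | github.com/Chcrf/ICT2214-WISE | Modules/decompiler/wat_parser.py | _paren_delta_outside_strings
-- ===== SOURCE A (Python) =====
-- def _paren_delta_outside_strings(line):
--     """Count parenthesis delta while ignoring quoted strings and escaped chars."""
--     delta = 0
--     in_string = False
--     escape = False
--     for ch in line:
--         if in_string:
--             if escape:
--                 escape = False
--             elif ch == "\\":
--                 escape = True
--             elif ch == "\"":
--                 in_string = False
--             continue
--         if ch == "\"":
--             in_string = True
--         elif ch == "(":
--             delta += 1
--         elif ch == ")":
--             delta -= 1
--     return delta
-- ===== SOURCE B (Python) =====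
-- def _paren_delta_outside_strings(line):
--     """Count parenthesis delta while ignoring quoted strings and escaped chars.
--
--     Index-driven: the outer loop walks the code; on a quote an inner loop
--     skips the whole string literal (consuming backslash pairs atomically).
--     """
--     delta = 0
--     i = 0
--     n = len(line)
--     while i < n:
--         ch = line[i]
--         if ch == '"':
--             i += 1
--             while i < n:
--                 c = line[i]
--                 if c == '\\':
--                     i += 2
--                 elif c == '"':
--                     i += 1
--                     break
--                 else:
--                     i += 1
--         else:
--             if ch == '(':
--                 delta += 1
--             elif ch == ')':
--                 delta -= 1
--             i += 1
--     return delta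
-- ===== Notes on version B (the rewrite author's own statement) =====
-- stated objective: alternative
-- what changed: Replaces the per-character in_string/escape boolean state machine with an index-driven scan whose inner loop skips an entire quoted string literal at once, consuming backslash-escape pairs atomically.
import Mathlib
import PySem

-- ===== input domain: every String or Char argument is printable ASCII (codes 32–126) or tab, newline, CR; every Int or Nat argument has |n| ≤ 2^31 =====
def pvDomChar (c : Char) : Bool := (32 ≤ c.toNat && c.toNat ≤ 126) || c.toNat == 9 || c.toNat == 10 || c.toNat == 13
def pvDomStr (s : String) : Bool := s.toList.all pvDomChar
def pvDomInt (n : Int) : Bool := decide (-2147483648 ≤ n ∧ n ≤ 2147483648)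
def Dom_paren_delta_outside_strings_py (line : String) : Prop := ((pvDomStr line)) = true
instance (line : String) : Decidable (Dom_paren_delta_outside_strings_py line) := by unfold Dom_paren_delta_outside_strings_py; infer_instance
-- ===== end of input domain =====

-- B replaces A's per-character in_string/escape state machine by an outer scan with
-- an inner loop that skips a whole quoted string literal (backslash pairs atomically).

-- ===== PORT A =====
-- one step of A's for-loop body on the state (delta, in_string, escape)
def pvStepA (s : Int × Bool × Bool) (ch : Char) : Int × Bool × Bool :=
  let (delta, in_string, escape) := s
  if in_string then
    if escape then (delta, true, false)
    else if ch = '\\' then (delta, true, true)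
    else if ch = '"' then (delta, false, false)
    else (delta, true, false)
  else
    if ch = '"' then (delta, true, false)
    else if ch = '(' then (delta + 1, false, false)
    else if ch = ')' then (delta - 1, false, false)
    else (delta, false, false)

def paren_delta_outside_strings_py (line : String) : Int :=
  (line.toList.foldl pvStepA (0, false, false)).1

-- ===== PORT B =====
-- B's outer while-loop (over the remaining suffix of the line) and its inner
-- string-skipping while-loop, as mutual structural recursion.
mutual
def pvOuterB : List Char → Int
  | [] => 0
  | ch :: rest =>
    if ch = '"' then pvInnerB rest
    else (if ch = '(' then (1 : Int) else if ch = ')' then -1 else 0) + pvOuterB rest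

def pvInnerB : List Char → Int
  | [] => 0
  | '\\' :: [] => 0
  | '\\' :: _ :: rest => pvInnerB rest
  | c :: rest => if c = '"' then pvOuterB rest else pvInnerB rest
end

def paren_delta_outside_strings_py_alt (line : String) : Int :=
  pvOuterB line.toList

-- ===== PRECONDITION & SPEC =====
def Spec_paren_delta_outside_strings_py (line : String) (out : Int) : Prop := out = paren_delta_outside_strings_py_alt line
instance (line : String) (out : Int) : Decidable (Spec_paren_delta_outside_strings_py line out) := by unfold Spec_paren_delta_outside_strings_py; infer_instance

-- ===== CLAIM (what is proved, stated in full; the proofs are below) =====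
def Claim_equal_paren_delta_outside_strings_py : Prop := ∀ (line : String), Dom_paren_delta_outside_strings_py line → Spec_paren_delta_outside_strings_py line (paren_delta_outside_strings_py line)

-- ===== LEMMAS AND PROOFS =====

-- one step only shifts delta: the new state's flags do not depend on delta
theorem pvStepA_shift (d : Int) (m e : Bool) (c : Char) :
    pvStepA (d, m, e) c = (d + (pvStepA (0, m, e) c).1, (pvStepA (0, m, e) c).2) := by
  cases m <;> cases e <;> simp only [pvStepA] <;> split_ifs <;> simp <;> omega

-- delta only accumulates: the fold from (d, m, e) is d plus the fold from the 0 state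
theorem pvFoldA_shift (l : List Char) : ∀ (d : Int) (m e : Bool),
    (l.foldl pvStepA (d, m, e)).1 = d + (l.foldl pvStepA (0, m, e)).1 := by
  induction l with
  | nil => intro d m e; simp
  | cons c t ih =>
    intro d m e
    rcases hsc : pvStepA (0, m, e) c with ⟨k, m', e'⟩
    have h1 : pvStepA (d, m, e) c = (d + k, m', e') := by rw [pvStepA_shift, hsc]
    simp only [List.foldl_cons, h1, hsc]
    rw [ih (d + k), ih k]
    ring

-- the three loop-invariant equations relating A's fold states to B's functions
theorem pvFoldA_eq (l : List Char) :
    (l.foldl pvStepA (0, false, false)).1 = pvOuterB l ∧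
    (l.foldl pvStepA (0, true, false)).1 = pvInnerB l ∧
    (l.foldl pvStepA (0, true, true)).1 = pvInnerB l.tail := by
  induction l with
  | nil => simp [pvOuterB, pvInnerB]
  | cons c t ih =>
    obtain ⟨ho, hi, he⟩ := ih
    refine ⟨?_, ?_, ?_⟩
    · by_cases hq : c = '"'
      · simp [pvStepA, hq, pvOuterB, hi]
      · by_cases hl : c = '('
        · simp [pvStepA, hl, pvOuterB, pvFoldA_shift, ho]
        · by_cases hr : c = ')'
          · simp [pvStepA, hr, pvOuterB, pvFoldA_shift, ho]
          · simp [pvStepA, hq, hl, hr, pvOuterB, ho]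
    · by_cases hb : c = '\\'
      · subst hb
        simp only [List.foldl_cons, pvStepA]
        norm_num
        cases t with
        | nil => simp only [pvInnerB]; simp at he; exact he
        | cons c' t' => simp only [pvInnerB]; simp at he; exact he
      · by_cases hq : c = '"'
        · subst hq
          have h3 : pvInnerB ('"' :: t) = pvOuterB t := by
            rw [pvInnerB.eq_def]
            split
            · simp_all
            · simp_all
            · simp_all
            · rename_i heq
              obtain ⟨hc, ht⟩ := List.cons.inj heq
              rw [← hc, ← ht, if_pos rfl]
          simp [pvStepA, h3, ho]
        · have h2 : pvInnerB (c :: t) = if c = '"' then pvOuterB t else pvInnerB t := by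
            rw [pvInnerB.eq_def]; split <;> simp_all
          simp [pvStepA, hb, hq, h2, hi]
    · simp [pvStepA, hi]

-- ===== VERDICT (by name: the statement is the Claim_ definition above) =====
theorem paren_delta_outside_strings_py_spec : Claim_equal_paren_delta_outside_strings_py := by
  intro line _
  unfold Spec_paren_delta_outside_strings_py paren_delta_outside_strings_py paren_delta_outside_strings_py_alt
  exact (pvFoldA_eq line.toList).1
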